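-- pv_equiv track=rewrite | github.com/whdrjs2626/Gungorithm | Python/programmers/level0/한번만등장한문자.py | solution
-- ===== SOURCE A (Python) =====
-- def solution(s):
--     result = {}
--     for i in s:
--         if result.get(i, '') == '':
--             result[i] = 1
--         else: result[i] += 1
--     answer = []
--     for a in result:
--         if result.get(a) == 1:
--             answer.append(a)
--     answer = ''.join(sorted(answer))
--     return answer
-- ===== SOURCE B (Python) =====
-- def solution(s):
--     t = sorted(s)
--     res = []
--     i = 0
--     n = len(t)
--     while i < n:
--         j = i + 1
--         while j < n and t[j] == t[i]:
--             j += 1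
--         if j == i + 1:
--             res.append(t[i])
--         i = j
--     return ''.join(res)
-- ===== Notes on version B (the rewrite author's own statement) =====
-- stated objective: alternative
-- what changed: Replaces A's frequency dictionary and two dict passes with sort-first-then-run-scan: B sorts the string once and emits each character whose run of equal neighbours has length 1, so no count table is ever built and the output needs no final sort.
import Mathlib
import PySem

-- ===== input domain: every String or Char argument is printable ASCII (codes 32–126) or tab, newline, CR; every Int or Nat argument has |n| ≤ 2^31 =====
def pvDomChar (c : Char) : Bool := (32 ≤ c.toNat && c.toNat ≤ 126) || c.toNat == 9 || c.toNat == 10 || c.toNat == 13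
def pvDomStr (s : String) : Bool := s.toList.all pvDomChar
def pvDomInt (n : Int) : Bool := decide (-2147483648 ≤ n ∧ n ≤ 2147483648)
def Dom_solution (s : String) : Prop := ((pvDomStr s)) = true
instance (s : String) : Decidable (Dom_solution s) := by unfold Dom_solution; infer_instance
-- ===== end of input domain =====

-- B replaces A's frequency dictionary with sort-first-then-run-scan: it sorts the string
-- once and emits each run of equal characters whose length is 1 — no counting table at all.

-- ===== PORT A =====
def solution (s : String) : String :=
  -- first loop: result.get(i, '') == '' tests absence (the stored values are ints, never '')
  let result : PySem.Dict Char Int := s.toList.foldl (fun d i =>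
    match PySem.Dict.get? d i with
    | none => d.insert i 1
    | some v => d.insert i (v + 1)) PySem.Dict.empty
  -- second loop: for a in result: if result.get(a) == 1: answer.append(a)
  let answer := result.keys.foldl (fun acc a =>
    if PySem.Dict.get? result a == some (1 : Int) then acc ++ [a] else acc) ([] : List Char)
  String.ofList (PySem.List.sorted answer (fun x => x) false)

-- ===== PORT B =====
-- the while loops of Source B: j advances over the run of t[i] (takeWhile/dropWhile on the
-- sorted list); keep t[i] iff its run stops right after it (j == i+1); continue at i = j
def runScan : List Char → List Char
  | [] => []
  | x :: xs =>
    if xs.takeWhile (fun y => y == x) = [] then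
      x :: runScan (xs.dropWhile (fun y => y == x))
    else
      runScan (xs.dropWhile (fun y => y == x))
termination_by t => t.length
decreasing_by
  all_goals
    have := List.length_dropWhile_le (p := fun y => y == x) (l := xs)
    simp only [List.length_cons]
    omega

def solution_alt (s : String) : String :=
  String.ofList (runScan (PySem.List.sorted s.toList (fun x => x) false))

-- ===== PRECONDITION & SPEC =====
def Spec_solution (s : String) (out : String) : Prop := out = solution_alt s
instance (s : String) (out : String) : Decidable (Spec_solution s out) := by unfold Spec_solution; infer_instance

-- ===== CLAIM (what is proved, stated in full; the proofs are below) =====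
def Claim_equal_solution : Prop := ∀ (s : String), Dom_solution s → Spec_solution s (solution s)

-- ===== LEMMAS AND PROOFS =====

-- A's per-character dict step is exactly Counter's modify step
lemma step_eq (d : PySem.Dict Char Int) (c : Char) :
    (match PySem.Dict.get? d c with
     | none => d.insert c (1 : Int)
     | some v => d.insert c (v + 1)) = d.modify c 0 (· + 1) := by
  cases h : PySem.Dict.get? d c <;>
    simp [PySem.Dict.modify, PySem.Dict.getD, h]

-- Counter's lookup on a present key is some(count)
lemma get?_counter_of_mem (xs : List Char) (a : Char) (hmem : a ∈ xs) :
    PySem.Dict.get? (PySem.Dict.counter xs) a = some (xs.count a : Int) := by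
  have hcount : 0 < xs.count a := List.count_pos_iff.mpr hmem
  have hD := PySem.Dict.getD_counter (xs := xs) (v := a)
  cases h : PySem.Dict.get? (PySem.Dict.counter xs) a with
  | none => simp [PySem.Dict.getD, h] at hD; omega
  | some v => simp [PySem.Dict.getD, h] at hD; simp [hD]

-- on a weakly increasing list the run scan keeps exactly the characters of count 1
lemma runScan_eq_filter : ∀ (t : List Char), t.Pairwise (· ≤ ·) →
    runScan t = t.filter (fun c => t.count c == 1) := by
  intro t
  induction t using runScan.induct with
  | case1 => intro _; simp [runScan]
  | case2 x xs h ih | case3 x xs h ih =>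
    intro hs
    set a := xs.takeWhile (fun y => y == x) with ha
    set b := xs.dropWhile (fun y => y == x) with hb
    obtain ⟨Pp, hPp⟩ : ∃ P : Char → Bool,
        P = fun c => (List.count c (x :: xs) == 1) := ⟨_, rfl⟩
    have ht : a ++ b = xs := List.takeWhile_append_dropWhile
    have hxs_pair : xs.Pairwise (· ≤ ·) := hs.of_cons
    have hb_pair : b.Pairwise (· ≤ ·) :=
      hxs_pair.sublist (List.dropWhile_sublist _)
    have hxle : ∀ z ∈ xs, x ≤ z := fun z hz => List.rel_of_pairwise_cons hs hz
    have hax : ∀ c ∈ a, c = x := by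
      intro c hc
      have := List.mem_takeWhile_imp hc
      simpa using this.symm
    have hxb : ∀ z ∈ b, z ≠ x := by
      cases hbe : b with
      | nil => simp
      | cons y b' =>
        have hy : ¬ (y == x) = true := by
          have := List.head_dropWhile_not (p := fun y => y == x) (l := xs)
            (by rw [← hb, hbe]; simp)
          simpa [← hb, hbe] using this
        have hyx : y ≠ x := by simpa using hy
        have hymem : y ∈ xs := by
          have : y ∈ b := by rw [hbe]; simp
          exact (List.dropWhile_sublist _).mem this
        have hxy : x < y := lt_of_le_of_ne (hxle y hymem) (Ne.symm hyx)
        intro z hz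
        rcases (by simpa [hbe] using hz : z = y ∨ z ∈ b') with rfl | hz'
        · exact hyx
        · have hyz : y ≤ z := List.rel_of_pairwise_cons (by rwa [hbe] at hb_pair) hz'
          exact (lt_of_lt_of_le hxy hyz).ne'
    have hacount : a.count x = a.length := by
      rw [List.count_eq_length]
      intro c hc; exact ((hax c hc).symm ▸ rfl)
    have hbcount : b.count x = 0 := by
      rw [List.count_eq_zero]
      intro hxmem; exact hxb x hxmem rfl
    have hcx : (x :: xs).count x = 1 + a.length := by
      rw [List.count_cons_self, ← ht, List.count_append, hacount, hbcount]
      omega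
    have hc2 : ∀ c ∈ b, (x :: xs).count c = b.count c := by
      intro c hc
      have hcx' : c ≠ x := hxb c hc
      have hca : a.count c = 0 := by
        rw [List.count_eq_zero]; intro hmem; exact hcx' (hax c hmem)
      rw [← ht]
      simp [List.count_append, hca, Ne.symm hcx']
    have hfb : b.filter Pp = b.filter (fun c => b.count c == 1) := by
      apply List.filter_congr
      intro c hc; rw [hPp]; simp only [hc2 c hc]
    have hfa : a.filter Pp = [] := by
      rw [List.filter_eq_nil_iff]
      intro c hc
      have h1 : 0 < a.length := List.length_pos_of_mem hc
      rw [hax c hc, hPp]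
      simp only [beq_iff_eq, hcx]
      omega
    have hfx : List.filter Pp xs = b.filter (fun c => b.count c == 1) := by
      rw [← ht, List.filter_append, hfa, hfb, List.nil_append]
    by_cases hae : a = []
    · have hPx : Pp x = true := by
        rw [hPp]; simpa using (show List.count x (x :: xs) = 1 by rw [hcx, hae]; simp)
      rw [runScan, if_pos (ha ▸ hae), ← hb, ih hb_pair, ← hPp, List.filter_cons, hPx,
        if_pos rfl, hfx]
    · have hPx : Pp x = false := by
        have h1 : 0 < a.length := List.length_pos_iff.mpr hae
        rw [hPp]
        simpa using (show List.count x (x :: xs) ≠ 1 by rw [hcx]; omega)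
      rw [runScan, if_neg (by rw [← ha]; exact hae), ← hb, ih hb_pair, ← hPp,
        List.filter_cons, hPx]
      simp only [Bool.false_eq_true, if_false]
      rw [hfx]

-- ===== VERDICT (by name: the statement is the Claim_ definition above) =====
theorem solution_spec : Claim_equal_solution := by
  intro s _
  show solution s = solution_alt s
  simp only [solution, solution_alt]
  have hstep : (s.toList.foldl (fun d i =>
      match PySem.Dict.get? d i with
      | none => d.insert i (1 : Int)
      | some v => d.insert i (v + 1)) PySem.Dict.empty) = PySem.Dict.counter s.toList := by
    exact PySem.List.foldl_congr_mem s.toList _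
      (fun d x => PySem.Dict.modify d x 0 (· + 1)) PySem.Dict.empty
      (fun acc x _ => step_eq acc x)
  rw [hstep, PySem.Dict.keys_counter, PySem.List.foldl_append_if_eq_filter, List.nil_append]
  have hLf : (PySem.Set.ofList s.toList).filter
        (fun a => PySem.Dict.get? (PySem.Dict.counter s.toList) a == some (1 : Int))
      = (PySem.Set.ofList s.toList).filter (fun a => s.toList.count a == 1) := by
    apply List.filter_congr
    intro a ha
    have hmem : a ∈ s.toList := (PySem.Set.mem_ofList (y := a) (xs := s.toList)).mp ha
    rw [get?_counter_of_mem s.toList a hmem]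
    show ((some (↑(s.toList.count a) : Int) == some 1)) = (s.toList.count a == 1)
    simp
  rw [hLf]
  apply congrArg String.ofList
  -- both sides: the count-1 characters in increasing order; B gets them by a run scan
  set t := PySem.List.sorted s.toList (fun x => x) false with htdef
  have ht_pair : t.Pairwise (· ≤ ·) := by
    simpa using PySem.List.sorted_pairwise (xs := s.toList) (key := fun x => x)
  have hperm_t : t.Perm s.toList := by
    rw [htdef]; exact PySem.List.sorted_perm (xs := s.toList) (key := fun x => x) (rev := false)
  have hrun : runScan t = t.filter (fun c => t.count c == 1) := runScan_eq_filter t ht_pair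
  apply PySem.List.sorted_id_eq_of_perm_of_pairwise
  · -- the run-scan output is a permutation of the filtered distinct characters
    rw [hrun]
    rw [List.perm_ext_iff_of_nodup]
    · intro c
      simp only [List.mem_filter, PySem.Set.mem_ofList, beq_iff_eq]
      constructor
      · rintro ⟨hc, hq⟩
        exact ⟨hperm_t.mem_iff.mp hc, by rw [← hperm_t.count_eq]; exact hq⟩
      · rintro ⟨hc, hq⟩
        exact ⟨hperm_t.mem_iff.mpr hc, by rw [hperm_t.count_eq]; exact hq⟩
    · -- nodup: each kept character has count 1 in t
      rw [List.nodup_iff_count_le_one]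
      intro c
      by_cases hq : (t.count c == 1) = true
      · have h1 : List.count c (t.filter (fun c => t.count c == 1)) ≤ List.count c t :=
          (List.filter_sublist (l := t)).count_le c
        have h2 : List.count c t = 1 := by simpa using hq
        omega
      · have hnm : c ∉ t.filter (fun c => t.count c == 1) := by
          simp only [List.mem_filter]
          exact fun hc => hq hc.2
        rw [List.count_eq_zero.mpr hnm]
        omega
    · exact (PySem.Set.nodup_ofList _).filter _
  · -- the run-scan output is weakly increasing (a sublist of the sorted string)
    rw [hrun]
    exact ht_pair.sublist List.filter_sublist
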